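-- pv_equiv track=rewrite | github.com/trigger1996/Enforcement_IWA | opacity_iwa/draft/t_aic_3.20220819.2118.py | setprate_nx_star
-- ===== SOURCE A (Python) =====
-- def setprate_nx_star(nx_star_un_merged):
--
--     # if a event can be observed through 2 OR MORE EDGES?
--     # then it should be merged / separated
--     # e.g.:  [('5', ('o3', 6, 16)), ('6', ('o3', 9, 20))] -->
--     #        [('5', ('o3', 6, 9)), (('5', '6'), ('o3', 9, 16)), ('6', ('o3', 9, 20))]
--     '''
--         Data structure:
--         [ ((state_1, state_2, ...), (event_t_1, t_1, t_2)),
--           ((state_3, ), (event_t_2, t_3, t_4)),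
--           ...
--          ]
--
--     '''
--     nx_star = []
--
--     for event_t in nx_star_un_merged.keys():
--         if nx_star_un_merged[event_t].__len__() == 1:
--             state_t = nx_star_un_merged[event_t][0][0]
--             t_min   = nx_star_un_merged[event_t][0][1][0]
--             t_max   = nx_star_un_merged[event_t][0][1][1]
--
--             nx_star.append((tuple(state_t), (event_t, (t_min, t_max))))
--         else:
--             '''
--                 nx_temp: Data structure:
--                 [ ((state_1, state_2, ...), (event_t_1, t_1, t_2)),
--                   ((state_3, ), (event_t_2, t_3, t_4)),
--                   ...
--                  ]
--             '''
--             nx_temp = []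
--             t_instant = []
--
--             # extract all time instant
--             for nx_w_time_t in nx_star_un_merged[event_t]:
--                 t_instant.append(nx_w_time_t[1][0])          # t_min
--                 t_instant.append(nx_w_time_t[1][1])          # t_max
--             t_instant = list(set(t_instant))
--             t_instant.sort()
--
--             # check all time instant for all reachable state
--             for i in range(0, t_instant.__len__() - 1):
--                 t_i      = t_instant[i]
--                 t_i_next = t_instant[i + 1]
--                 reachable_state = []
--
--                 # merge / separated states within the same policy
--                 for nx_w_time_t in nx_star_un_merged[event_t]:
--                     state_t = nx_w_time_t[0]
--                     t_min   = nx_w_time_t[1][0]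
--                     t_max   = nx_w_time_t[1][1]
--                     if t_i >= t_min and t_i < t_max:
--                         reachable_state.append(state_t)
--
--                 # sort reachable state
--                 reachable_state = list(set(reachable_state))
--                 reachable_state.sort()
--
--                 nx_temp.append((tuple(reachable_state), (event_t, (t_i, t_i_next))))
--
--             nx_star = nx_star + nx_temp
--
--     return nx_star
-- ===== SOURCE B (Python) =====
-- def setprate_nx_star(nx_star_un_merged):
--     # Sweep line: group interval starts once, then carry the active edge set
--     # incrementally across the sorted endpoints instead of rescanning every
--     # edge for every elementary interval.
--     nx_star = []
--     for event_t, edges in nx_star_un_merged.items():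
--         if len(edges) == 1:
--             state_t, (t_min, t_max) = edges[0]
--             nx_star.append((tuple(state_t), (event_t, (t_min, t_max))))
--         else:
--             ts = sorted({t for _s, (a, b) in edges for t in (a, b)})
--             starts = {}
--             for state, (a, b) in edges:
--                 if a < b:
--                     starts.setdefault(a, []).append((state, b))
--             active = []
--             for i in range(len(ts) - 1):
--                 t = ts[i]
--                 active = [e for e in active if e[1] != t] + starts.get(t, [])
--                 states = sorted({s for s, _b in active})
--                 nx_star.append((tuple(states), (event_t, (t, ts[i + 1]))))
--     return nx_star
-- ===== Notes on version B (the rewrite author's own statement) =====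
-- stated objective: faster
-- what changed: Per event, instead of rescanning every edge for every elementary interval, B groups interval starts in a dict once and sweeps the sorted endpoints carrying the active edge set incrementally.
import Mathlib
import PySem

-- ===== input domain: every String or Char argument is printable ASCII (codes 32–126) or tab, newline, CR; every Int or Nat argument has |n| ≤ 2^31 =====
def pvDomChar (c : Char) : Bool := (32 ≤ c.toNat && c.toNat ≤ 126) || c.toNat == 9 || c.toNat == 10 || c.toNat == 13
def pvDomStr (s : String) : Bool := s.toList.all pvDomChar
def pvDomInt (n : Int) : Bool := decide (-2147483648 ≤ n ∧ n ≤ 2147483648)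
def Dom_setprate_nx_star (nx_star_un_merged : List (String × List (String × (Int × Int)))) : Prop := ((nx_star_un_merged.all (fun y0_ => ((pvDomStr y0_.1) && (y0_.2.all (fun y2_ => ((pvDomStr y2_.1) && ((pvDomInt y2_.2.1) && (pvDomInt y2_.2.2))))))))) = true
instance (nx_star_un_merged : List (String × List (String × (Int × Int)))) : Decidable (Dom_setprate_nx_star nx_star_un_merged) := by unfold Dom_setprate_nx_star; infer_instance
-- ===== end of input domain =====

-- B replaces A's per-elementary-interval rescan of all edges by a sweep line over the
-- sorted endpoints that carries the active edge set incrementally (objective: faster).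


-- ===== PORT A =====
-- "for nx_w_time_t in ...: if t_i >= t_min and t_i < t_max: reachable_state.append(state_t)"
def aReach (edges : List (String × (Int × Int))) (t : Int) : List String :=
  edges.foldl (fun acc e => if t ≥ e.2.1 ∧ t < e.2.2 then acc ++ [e.1] else acc) []

-- "t_instant.append(t_min); t_instant.append(t_max)", then "list(set(...))" + ".sort()"
def aTimes (edges : List (String × (Int × Int))) : List Int :=
  PySem.List.sorted (PySem.Set.ofList (edges.foldl (fun acc e => (acc ++ [e.2.1]) ++ [e.2.2]) [])) (fun x => x)

-- one iteration of "for event_t in nx_star_un_merged.keys()" (body appended to nx_star)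
def aEvent (event_t : String) (edges : List (String × (Int × Int))) :
    List (List String × (String × (Int × Int))) :=
  if PySem.List.len edges == 1 then
    let e0 := PySem.List.pyGetD edges 0 ("", (0, 0))
    -- tuple(state_t) splits the state string into its characters
    [(e0.1.toList.map (fun c => String.ofList [c]), (event_t, (e0.2.1, e0.2.2)))]
  else
    let t_instant := aTimes edges
    (PySem.List.pyRange 0 (PySem.List.len t_instant - 1) 1).foldl
      (fun nx_temp i =>
        let t_i := PySem.List.pyGetD t_instant i 0
        let t_i_next := PySem.List.pyGetD t_instant (i + 1) 0
        nx_temp ++ [(PySem.List.sorted (PySem.Set.ofList (aReach edges t_i)) (fun x => x),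
                     (event_t, (t_i, t_i_next)))]) []

def setprate_nx_star (nx_star_un_merged : List (String × List (String × (Int × Int)))) :
    List (List String × (String × (Int × Int))) :=
  nx_star_un_merged.foldl (fun nx_star kv => nx_star ++ aEvent kv.1 kv.2) []

-- ===== PORT B =====
-- "ts = sorted({t for _s, (a, b) in edges for t in (a, b)})"
def bTimes (edges : List (String × (Int × Int))) : List Int :=
  PySem.List.sorted (PySem.Set.ofList (edges.flatMap (fun e => [e.2.1, e.2.2]))) (fun x => x)

-- "for state, (a, b) in edges: if a < b: starts.setdefault(a, []).append((state, b))"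
def bStarts (edges : List (String × (Int × Int))) : PySem.Dict Int (List (String × Int)) :=
  edges.foldl
    (fun d e => if e.2.1 < e.2.2 then d.modify e.2.1 [] (· ++ [(e.1, e.2.2)]) else d)
    PySem.Dict.empty

-- one iteration of the sweep "for i in range(len(ts) - 1)"
def bStep (event_t : String) (ts : List Int) (starts : PySem.Dict Int (List (String × Int)))
    (st : List (String × Int) × List (List String × (String × (Int × Int)))) (i : Int) :
    List (String × Int) × List (List String × (String × (Int × Int))) :=
  let t := PySem.List.pyGetD ts i 0
  let active := st.1.filter (fun e => decide (e.2 ≠ t)) ++ starts.getD t []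
  (active,
   st.2 ++ [(PySem.List.sorted (PySem.Set.ofList (active.map (·.1))) (fun x => x),
             (event_t, (t, PySem.List.pyGetD ts (i + 1) 0)))])

def bEvent (event_t : String) (edges : List (String × (Int × Int))) :
    List (List String × (String × (Int × Int))) :=
  if PySem.List.len edges == 1 then
    let e0 := PySem.List.pyGetD edges 0 ("", (0, 0))
    [(e0.1.toList.map (fun c => String.ofList [c]), (event_t, (e0.2.1, e0.2.2)))]
  else
    ((PySem.List.pyRange 0 (PySem.List.len (bTimes edges) - 1) 1).foldl
      (bStep event_t (bTimes edges) (bStarts edges)) ([], [])).2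

def setprate_nx_star_alt (nx_star_un_merged : List (String × List (String × (Int × Int)))) :
    List (List String × (String × (Int × Int))) :=
  nx_star_un_merged.foldl (fun nx_star kv => nx_star ++ bEvent kv.1 kv.2) []

-- ===== PRECONDITION & SPEC =====
-- Pre_ excludes association lists with duplicate event keys: a Python dict cannot hold
-- duplicate keys, so such lists represent no input of the Python function (dict(...)
-- would silently collapse them).
def Pre_setprate_nx_star (nx_star_un_merged : List (String × List (String × (Int × Int)))) : Prop :=
  (nx_star_un_merged.map (·.1)).Nodup
instance (nx_star_un_merged : List (String × List (String × (Int × Int)))) : Decidable (Pre_setprate_nx_star nx_star_un_merged) := by unfold Pre_setprate_nx_star; infer_instance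
def pvWitness_setprate_nx_star : (List (String × List (String × (Int × Int)))) :=
  [("o3", [("5", (6, 16)), ("6", (9, 20))])]

def Spec_setprate_nx_star (nx_star_un_merged : List (String × List (String × (Int × Int)))) (out : List (List String × (String × (Int × Int)))) : Prop := out = setprate_nx_star_alt nx_star_un_merged
instance (nx_star_un_merged : List (String × List (String × (Int × Int)))) (out : List (List String × (String × (Int × Int)))) : Decidable (Spec_setprate_nx_star nx_star_un_merged out) := by unfold Spec_setprate_nx_star; infer_instance

-- ===== CLAIM (what is proved, stated in full; the proofs are below) =====
def Claim_equal_setprate_nx_star : Prop := ∀ (nx_star_un_merged : List (String × List (String × (Int × Int)))), Dom_setprate_nx_star nx_star_un_merged → Pre_setprate_nx_star nx_star_un_merged → Spec_setprate_nx_star nx_star_un_merged (setprate_nx_star nx_star_un_merged)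

-- ===== LEMMAS AND PROOFS =====

-- edges active on the elementary interval starting at t, with their end times
def Act (edges : List (String × (Int × Int))) (t : Int) : List (String × Int) :=
  (edges.filter (fun e => decide (t ≥ e.2.1 ∧ t < e.2.2))).map (fun e => (e.1, e.2.2))

-- the active edge set after j sweep iterations
def prevAct (edges : List (String × (Int × Int))) (T : List Int) : Nat → List (String × Int)
  | 0 => []
  | j + 1 => Act edges (T.getD j 0)

theorem foldl_two_appends (edges : List (String × (Int × Int))) :
    edges.foldl (fun acc e => (acc ++ [e.2.1]) ++ [e.2.2]) [] =
      edges.flatMap (fun e => [e.2.1, e.2.2]) := by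
  rw [show (fun (acc : List Int) (e : String × (Int × Int)) => (acc ++ [e.2.1]) ++ [e.2.2])
      = fun acc e => acc ++ [e.2.1, e.2.2] from funext fun acc => funext fun e => by simp]
  simpa using PySem.List.foldl_append_eq_flatMap (fun e : String × (Int × Int) => [e.2.1, e.2.2]) edges []

theorem times_eq (edges : List (String × (Int × Int))) : bTimes edges = aTimes edges := by
  unfold bTimes aTimes
  rw [foldl_two_appends]

theorem mem_aTimes (edges : List (String × (Int × Int))) (x : Int) :
    x ∈ aTimes edges ↔ x ∈ edges.flatMap (fun e => [e.2.1, e.2.2]) := by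
  unfold aTimes
  rw [foldl_two_appends]
  rw [(PySem.List.sorted_perm _ _ false).mem_iff]
  simp [PySem.Set.mem_ofList]

theorem pairwise_aTimes (edges : List (String × (Int × Int))) :
    (aTimes edges).Pairwise (· < ·) := by
  unfold aTimes
  have hnd : (PySem.List.sorted (PySem.Set.ofList (edges.foldl (fun acc e => (acc ++ [e.2.1]) ++ [e.2.2]) [])) (fun x : Int => x)).Nodup :=
    (PySem.List.sorted_perm _ _ false).nodup_iff.mpr (PySem.Set.nodup_ofList _)
  have hle := PySem.List.sorted_pairwise (PySem.Set.ofList (edges.foldl (fun acc e => (acc ++ [e.2.1]) ++ [e.2.2]) [])) (fun x : Int => x)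
  exact (hle.and hnd).imp (fun h => lt_of_le_of_ne h.1 h.2)

theorem aReach_eq (edges : List (String × (Int × Int))) (t : Int) :
    aReach edges t = (Act edges t).map Prod.fst := by
  unfold aReach Act
  rw [PySem.List.foldl_append_ite (p := fun e : String × (Int × Int) => t ≥ e.2.1 ∧ t < e.2.2) (f := fun e => e.1)]
  simp [List.map_map]

theorem starts_getD (edges : List (String × (Int × Int))) (t : Int) :
    (bStarts edges).getD t [] =
      ((edges.filter (fun e => decide (e.2.1 < e.2.2))).filter (fun e => e.2.1 == t)).map
        (fun e => (e.1, e.2.2)) := by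
  unfold bStarts
  rw [PySem.List.foldl_ite_eq_foldl_filter (p := fun e : String × (Int × Int) => e.2.1 < e.2.2)]
  rw [show (edges.filter (fun e => decide (e.2.1 < e.2.2))).foldl
        (fun (d : PySem.Dict Int (List (String × Int))) e => d.modify e.2.1 [] (· ++ [(e.1, e.2.2)])) PySem.Dict.empty
      = ((edges.filter (fun e => decide (e.2.1 < e.2.2))).map (fun e => (e.2.1, (e.1, e.2.2)))).foldl
        (fun d p => d.modify p.1 [] (· ++ [p.2])) PySem.Dict.empty from
      (List.foldl_map (f := fun e : String × (Int × Int) => (e.2.1, (e.1, e.2.2)))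
        (g := fun (d : PySem.Dict Int (List (String × Int))) (p : Int × (String × Int)) => d.modify p.1 [] (· ++ [p.2]))
        (l := edges.filter (fun e => decide (e.2.1 < e.2.2))) (init := PySem.Dict.empty)).symm]
  rw [PySem.Dict.getD_foldl_modify_append]
  simp [List.filter_map, List.map_map]

theorem sorted_set_congr {α : Type} [LinearOrder α] (l1 l2 : List α)
    (h : ∀ a, a ∈ l1 ↔ a ∈ l2) :
    PySem.List.sorted (PySem.Set.ofList l1) (fun x => x) =
      PySem.List.sorted (PySem.Set.ofList l2) (fun x => x) := by
  apply PySem.List.sorted_eq_of_perm_of_pairwise_lt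
  · refine ((PySem.List.sorted_perm (PySem.Set.ofList l2) (fun x : α => x) false).trans ?_)
    refine (List.perm_ext_iff_of_nodup (PySem.Set.nodup_ofList l2) (PySem.Set.nodup_ofList l1)).mpr ?_
    intro a; simp [PySem.Set.mem_ofList, h a]
  · have hnd : (PySem.List.sorted (PySem.Set.ofList l2) (fun x : α => x)).Nodup :=
      (PySem.List.sorted_perm (PySem.Set.ofList l2) (fun x : α => x) false).nodup_iff.mpr (PySem.Set.nodup_ofList l2)
    have hle := PySem.List.sorted_pairwise (PySem.Set.ofList l2) (fun x : α => x)
    exact (hle.and hnd).imp (fun h => lt_of_le_of_ne h.1 h.2)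

theorem filter_append_perm {α : Type} (p q r : α → Bool) (l : List α)
    (h : ∀ x ∈ l, (r x = true ↔ p x = true ∨ q x = true) ∧ ¬(p x = true ∧ q x = true)) :
    (l.filter p ++ l.filter q).Perm (l.filter r) := by
  induction l with
  | nil => simp
  | cons x xs ih =>
    have hx := h x (by simp)
    have ih' := ih (fun y hy => h y (by simp [hy]))
    by_cases hp : p x = true
    · have hq : ¬ q x = true := fun hq => hx.2 ⟨hp, hq⟩
      have hr : r x = true := hx.1.mpr (Or.inl hp)
      simp [hp, hq, hr]
      exact ih'
    · by_cases hq : q x = true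
      · have hr : r x = true := hx.1.mpr (Or.inr hq)
        simp [hp, hq, hr]
        exact (List.perm_middle).trans (ih'.cons x)
      · have hr : ¬ r x = true := fun hr => (hx.1.mp hr).elim hp hq
        simp [hp, hq, hr]
        exact ih'

theorem gap_lemma (T : List Int) (h : T.Pairwise (· < ·)) (i : Nat) (hi : i + 1 < T.length)
    (x : Int) (hx : x ∈ T) :
    (T[i] < x → T[i + 1] ≤ x) ∧ (x < T[i + 1] → x ≤ T[i]) := by
  obtain ⟨k, hk, rfl⟩ := List.getElem_of_mem hx
  have mono : ∀ a b : Nat, (ha : a < T.length) → (hb : b < T.length) → a < b → T[a] < T[b] :=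
    fun a b ha hb hab => List.pairwise_iff_getElem.mp h a b ha hb hab
  have hiL : i < T.length := by omega
  constructor
  · intro hlt
    rcases lt_trichotomy k (i + 1) with h1 | h1 | h1
    · rcases Nat.lt_or_ge k i with h2 | h2
      · exact absurd (mono k i hk hiL h2) (by omega)
      · have hki : k = i := by omega
        subst hki; omega
    · subst h1; exact le_refl _
    · exact le_of_lt (mono (i + 1) k hi hk h1)
  · intro hlt
    rcases lt_trichotomy k (i + 1) with h1 | h1 | h1
    · rcases Nat.lt_or_ge k i with h2 | h2
      · exact le_of_lt (mono k i hk hiL h2)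
      · have hki : k = i := by omega
        subst hki; exact le_refl _
    · subst h1; omega
    · exact absurd (mono (i + 1) k hi hk h1) (by omega)

theorem head_le (T : List Int) (h : T.Pairwise (· < ·)) (h0 : 0 < T.length)
    (x : Int) (hx : x ∈ T) : T[0] ≤ x := by
  obtain ⟨k, hk, rfl⟩ := List.getElem_of_mem hx
  rcases Nat.eq_zero_or_pos k with rfl | hk'
  · exact le_refl _
  · exact le_of_lt (List.pairwise_iff_getElem.mp h 0 k h0 hk hk')

theorem mem_T_of_mem_edges (edges : List (String × (Int × Int))) (e : String × (Int × Int))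
    (he : e ∈ edges) : e.2.1 ∈ aTimes edges ∧ e.2.2 ∈ aTimes edges := by
  constructor <;> (rw [mem_aTimes]; simp [List.mem_flatMap]; exact ⟨e.1, e.2.1, e.2.2, he, by simp⟩)

theorem step_perm (edges : List (String × (Int × Int))) (j : Nat)
    (hj : j + 1 < (aTimes edges).length) :
    ((prevAct edges (aTimes edges) j).filter (fun e => decide (e.2 ≠ (aTimes edges).getD j 0)) ++
        (bStarts edges).getD ((aTimes edges).getD j 0) []).Perm
      (Act edges ((aTimes edges).getD j 0)) := by
  have pw := pairwise_aTimes edges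
  rw [starts_getD, List.filter_filter]
  rw [List.getD_eq_getElem _ _ (by omega : j < (aTimes edges).length)]
  cases j with
  | zero =>
    show (List.filter _ [] ++ _).Perm _
    rw [List.filter_nil, List.nil_append]
    unfold Act
    refine List.Perm.map _ (List.Perm.of_eq (List.filter_congr ?_).symm)
    intro e he
    obtain ⟨ha, hb⟩ := mem_T_of_mem_edges edges e he
    have h0a : (aTimes edges)[0] ≤ e.2.1 := head_le _ pw (by omega) _ ha
    have h0b : (aTimes edges)[0] ≤ e.2.2 := head_le _ pw (by omega) _ hb
    rw [Bool.eq_iff_iff]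
    simp only [Bool.and_eq_true, decide_eq_true_eq, beq_iff_eq]
    omega
  | succ j =>
    show ((Act edges ((aTimes edges).getD j 0)).filter _ ++ _).Perm _
    rw [List.getD_eq_getElem _ _ (by omega : j < (aTimes edges).length)]
    unfold Act
    rw [List.filter_map, List.filter_filter]
    rw [← List.map_append]
    refine List.Perm.map _ ?_
    refine filter_append_perm _ _ _ _ ?_
    intro e he
    obtain ⟨ha, hb⟩ := mem_T_of_mem_edges edges e he
    have gpa := gap_lemma _ pw j (by omega) _ ha
    have gpb := gap_lemma _ pw j (by omega) _ hb
    have hst : (aTimes edges)[j] < (aTimes edges)[j+1] :=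
      List.pairwise_iff_getElem.mp pw j (j+1) (by omega) (by omega) (by omega)
    have Ha : ¬((aTimes edges)[j] < e.2.1 ∧ e.2.1 < (aTimes edges)[j+1]) :=
      fun hc => absurd (gpa.1 hc.1) (by omega)
    have Hb : ¬((aTimes edges)[j] < e.2.2 ∧ e.2.2 < (aTimes edges)[j+1]) :=
      fun hc => absurd (gpb.1 hc.1) (by omega)
    simp only [Function.comp, Bool.and_eq_true, decide_eq_true_eq, beq_iff_eq]
    constructor
    · omega
    · omega

theorem sweep (event_t : String) (edges : List (String × (Int × Int))) (j : Nat)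
    (hj : j = 0 ∨ j + 1 ≤ (aTimes edges).length) :
    ∃ act,
      ((List.range j).foldl
          (fun st (k : Nat) => bStep event_t (aTimes edges) (bStarts edges) st ((0 : Int) + k))
          ([], [])) =
        (act,
          (List.range j).map (fun k =>
            (PySem.List.sorted (PySem.Set.ofList (aReach edges ((aTimes edges).getD k 0))) (fun x => x),
             (event_t, ((aTimes edges).getD k 0, (aTimes edges).getD (k + 1) 0))))) ∧
      act.Perm (prevAct edges (aTimes edges) j) := by
  induction j with
  | zero => exact ⟨[], by simp, List.Perm.refl _⟩
  | succ j ih =>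
    have hj' : j + 2 ≤ (aTimes edges).length := by omega
    obtain ⟨act, hfold, hperm⟩ := ih (Or.inr (by omega))
    rw [List.range_succ, List.foldl_append, hfold, List.foldl_cons, List.foldl_nil]
    have hcast : (0 : Int) + (j : Nat) = ((j : Nat) : Int) := by omega
    have hcast1 : ((0 : Int) + (j : Nat)) + 1 = (((j + 1 : Nat)) : Int) := by push_cast; omega
    unfold bStep
    simp only [hcast, PySem.List.pyGetD_natCast]
    rw [show ((j : Nat) : Int) + 1 = (((j + 1 : Nat)) : Int) by push_cast; ring]
    simp only [PySem.List.pyGetD_natCast]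
    set t := (aTimes edges).getD j 0 with ht
    have hstep : (act.filter (fun e => decide (e.2 ≠ t)) ++ (bStarts edges).getD t []).Perm
        (Act edges t) := by
      refine List.Perm.trans ?_ (step_perm edges j (by omega))
      exact (hperm.filter _).append_right _
    refine ⟨_, ?_, hstep⟩
    conv_rhs => rw [List.map_append]
    simp only [Prod.mk.injEq]
    refine ⟨trivial, congrArg₂ HAppend.hAppend rfl ?_⟩
    congr 1
    simp only [Prod.mk.injEq]
    refine ⟨?_, trivial, ht, trivial⟩
    apply sorted_set_congr
    intro a
    rw [aReach_eq, ← ht]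
    exact (hstep.map Prod.fst).mem_iff

theorem event_eq (event_t : String) (edges : List (String × (Int × Int))) :
    aEvent event_t edges = bEvent event_t edges := by
  unfold aEvent bEvent
  by_cases h : PySem.List.len edges == 1
  · rw [if_pos h, if_pos h]
  · rw [if_neg h, if_neg h, times_eq]
    show (PySem.List.pyRange 0 (PySem.List.len (aTimes edges) - 1) 1).foldl
        (fun nx_temp i =>
          nx_temp ++ [(PySem.List.sorted (PySem.Set.ofList (aReach edges (PySem.List.pyGetD (aTimes edges) i 0))) (fun x => x),
                       (event_t, (PySem.List.pyGetD (aTimes edges) i 0,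
                                  PySem.List.pyGetD (aTimes edges) (i + 1) 0)))]) []
      = _
    rw [PySem.List.pyRange_one, List.foldl_map, List.foldl_map]
    have hj : (PySem.List.len (aTimes edges) - 1 - 0).toNat = 0 ∨
        (PySem.List.len (aTimes edges) - 1 - 0).toNat + 1 ≤ (aTimes edges).length := by
      simp only [PySem.List.len_eq]
      rcases Nat.eq_zero_or_pos (aTimes edges).length with h0 | h0
      · left; omega
      · right; omega
    obtain ⟨act, hfold, -⟩ := sweep event_t edges ((PySem.List.len (aTimes edges) - 1 - 0).toNat) hj
    rw [hfold]
    rw [PySem.List.foldl_append_singleton_eq_map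
      (f := fun k : Nat =>
        (PySem.List.sorted (PySem.Set.ofList (aReach edges (PySem.List.pyGetD (aTimes edges) ((0 : Int) + k) 0))) (fun x => x),
         (event_t, (PySem.List.pyGetD (aTimes edges) ((0 : Int) + k) 0,
                    PySem.List.pyGetD (aTimes edges) (((0 : Int) + k) + 1) 0))))]
    rw [List.nil_append]
    apply List.map_congr_left
    intro k _
    have hc : (0 : Int) + (k : Nat) = ((k : Nat) : Int) := by omega
    have hc1 : ((0 : Int) + (k : Nat)) + 1 = (((k + 1 : Nat)) : Int) := by push_cast; ring
    rw [hc1, hc]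
    simp only [PySem.List.pyGetD_natCast]

-- ===== VERDICT (by name: the statement is the Claim_ definition above) =====
theorem setprate_nx_star_spec : Claim_equal_setprate_nx_star := by
  intro input _dom _pre
  unfold Spec_setprate_nx_star setprate_nx_star setprate_nx_star_alt
  have h : (fun (nx_star : List (List String × (String × (Int × Int)))) (kv : String × List (String × (Int × Int))) => nx_star ++ aEvent kv.1 kv.2)
      = (fun nx_star kv => nx_star ++ bEvent kv.1 kv.2) := by
    funext nx kv; rw [event_eq]
  rw [h]
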